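-- pv_equiv track=rewrite | github.com/nkoch33/Black_Jack_RL_Project | game.py | _has_usable_ace
-- ===== SOURCE A (Python) =====
-- def _has_usable_ace(cards: list) -> bool:
--     """Check if hand has a usable ace (ace that can be 11 without busting)."""
--     sum_val = 0
--     num_aces = 0
--
--     for card in cards:
--         if card == 1:
--             num_aces += 1
--             sum_val += 11
--         elif card >= 10:
--             sum_val += 10
--         else:
--             sum_val += card
--
--     # Check if any ace can be 11
--     while sum_val > 21 and num_aces > 0:
--         sum_val -= 10
--         num_aces -= 1
--
--     return num_aces > 0
-- ===== SOURCE B (Python) =====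
-- def _has_usable_ace(cards: list) -> bool:
--     """Check if hand has a usable ace (ace that can be 11 without busting)."""
--     base_sum = 0
--     num_aces = 0
--     for card in cards:
--         if card == 1:
--             base_sum += 1
--             num_aces += 1
--         elif card >= 10:
--             base_sum += 10
--         else:
--             base_sum += card
--     # At most one ace can ever count as 11, so the demotion loop collapses to:
--     return num_aces >= 1 and base_sum + 10 <= 21
-- ===== Notes on version B (the rewrite author's own statement) =====
-- stated objective: simpler
-- what changed: Replaces the counting-aces-as-11 sum plus the iterative demotion while-loop with a single pass over a minimal base sum (aces count 1) and a closed-form check num_aces >= 1 and base_sum + 10 <= 21, since at most one ace can be usable.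
import Mathlib
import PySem

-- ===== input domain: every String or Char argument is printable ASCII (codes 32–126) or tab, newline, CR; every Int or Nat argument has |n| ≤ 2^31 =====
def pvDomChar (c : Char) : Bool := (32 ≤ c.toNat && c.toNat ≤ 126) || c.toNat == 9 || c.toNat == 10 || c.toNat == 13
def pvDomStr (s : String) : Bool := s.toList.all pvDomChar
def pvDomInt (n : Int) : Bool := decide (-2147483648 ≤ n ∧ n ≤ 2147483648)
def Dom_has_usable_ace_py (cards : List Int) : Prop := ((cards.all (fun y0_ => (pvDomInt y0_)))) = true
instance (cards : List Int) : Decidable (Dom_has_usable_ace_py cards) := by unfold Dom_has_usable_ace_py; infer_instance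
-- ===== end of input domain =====

-- B replaces A's ace-as-11 sum and demotion while-loop by a base sum (aces count 1) and the
-- closed-form check num_aces >= 1 && base_sum + 10 <= 21 (simpler; at most one ace is usable).


-- ===== PORT A =====
-- the `while sum_val > 21 and num_aces > 0:` loop; terminates because num_aces decreases
def demoteA (sum_val num_aces : Int) : Int × Int :=
  if sum_val > 21 ∧ num_aces > 0 then demoteA (sum_val - 10) (num_aces - 1)
  else (sum_val, num_aces)
termination_by num_aces.toNat
decreasing_by omega

def has_usable_ace_py (cards : List Int) : Bool :=
  let st := cards.foldl (fun (st : Int × Int) card =>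
    if card == 1 then (st.1 + 11, st.2 + 1)
    else if card ≥ 10 then (st.1 + 10, st.2)
    else (st.1 + card, st.2)) (0, 0)
  let r := demoteA st.1 st.2
  decide (r.2 > 0)

-- ===== PORT B =====
def has_usable_ace_py_alt (cards : List Int) : Bool :=
  let st := cards.foldl (fun (st : Int × Int) card =>
    if card == 1 then (st.1 + 1, st.2 + 1)
    else if card ≥ 10 then (st.1 + 10, st.2)
    else (st.1 + card, st.2)) (0, 0)
  decide (st.2 ≥ 1 ∧ st.1 + 10 ≤ 21)

-- ===== PRECONDITION & SPEC =====
def Spec_has_usable_ace_py (cards : List Int) (out : Bool) : Prop := out = has_usable_ace_py_alt cards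
instance (cards : List Int) (out : Bool) : Decidable (Spec_has_usable_ace_py cards out) := by unfold Spec_has_usable_ace_py; infer_instance

-- ===== CLAIM (what is proved, stated in full; the proofs are below) =====
def Claim_equal_has_usable_ace_py : Prop := ∀ (cards : List Int), Dom_has_usable_ace_py cards → Spec_has_usable_ace_py cards (has_usable_ace_py cards)

-- ===== LEMMAS AND PROOFS =====

-- A's fold state equals B's fold state with 10 added per counted ace
theorem fold_rel (cards : List Int) : ∀ (b n : Int),
    cards.foldl (fun (st : Int × Int) card =>
      if card == 1 then (st.1 + 11, st.2 + 1)
      else if card ≥ 10 then (st.1 + 10, st.2)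
      else (st.1 + card, st.2)) (b + 10 * n, n)
    = ((cards.foldl (fun (st : Int × Int) card =>
        if card == 1 then (st.1 + 1, st.2 + 1)
        else if card ≥ 10 then (st.1 + 10, st.2)
        else (st.1 + card, st.2)) (b, n)).1 + 10 * (cards.foldl (fun (st : Int × Int) card =>
        if card == 1 then (st.1 + 1, st.2 + 1)
        else if card ≥ 10 then (st.1 + 10, st.2)
        else (st.1 + card, st.2)) (b, n)).2,
       (cards.foldl (fun (st : Int × Int) card =>
        if card == 1 then (st.1 + 1, st.2 + 1)
        else if card ≥ 10 then (st.1 + 10, st.2)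
        else (st.1 + card, st.2)) (b, n)).2) := by
  induction cards with
  | nil => intro b n; simp
  | cons c cs ih =>
    intro b n
    by_cases h1 : c = 1
    · simp only [List.foldl, h1]
      have : (b + 10 * n + 11, n + 1) = ((b + 1) + 10 * (n + 1), n + 1) := by simp only [Prod.mk.injEq, and_true]; ring
      simp only [this]
      simpa using ih (b + 1) (n + 1)
    · by_cases h2 : c ≥ 10
      · simp only [List.foldl]
        rw [if_neg (by simpa using h1), if_pos h2, if_neg (by simpa using h1), if_pos h2]
        have : (b + 10 * n + 10, n) = ((b + 10) + 10 * n, n) := by simp only [Prod.mk.injEq, and_true]; ring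
        rw [this]; exact ih (b + 10) n
      · simp only [List.foldl]
        rw [if_neg (by simpa using h1), if_neg h2, if_neg (by simpa using h1), if_neg h2]
        have : (b + 10 * n + c, n) = ((b + c) + 10 * n, n) := by simp only [Prod.mk.injEq, and_true]; ring
        rw [this]; exact ih (b + c) n

-- B's ace counter stays nonnegative
theorem fold_aces_nonneg (cards : List Int) : ∀ (b n : Int), 0 ≤ n →
    0 ≤ (cards.foldl (fun (st : Int × Int) card =>
      if card == 1 then (st.1 + 1, st.2 + 1)
      else if card ≥ 10 then (st.1 + 10, st.2)
      else (st.1 + card, st.2)) (b, n)).2 := by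
  induction cards with
  | nil => intro b n hn; simpa using hn
  | cons c cs ih =>
    intro b n hn
    simp only [List.foldl]
    split_ifs with h1 h2
    · exact ih _ _ (by omega)
    · exact ih _ _ hn
    · exact ih _ _ hn

-- characterisation of the demotion loop's remaining ace count
theorem demote_pos (s a : Int) (ha : 0 ≤ a) :
    ((demoteA s a).2 > 0) ↔ (0 < a ∧ s - 10 * a + 10 ≤ 21) := by
  generalize hk : a.toNat = k
  induction k generalizing s a with
  | zero =>
    rw [demoteA]
    have ha0 : a = 0 := by omega
    subst ha0
    simp
  | succ k ih =>
    rw [demoteA]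
    by_cases h : s > 21 ∧ a > 0
    · rw [if_pos h]
      rw [ih (s - 10) (a - 1) (by omega) (by omega)]
      constructor
      · rintro ⟨h1, h2⟩; constructor; omega; omega
      · rintro ⟨h1, h2⟩
        constructor
        · by_contra hne
          have : a = 1 := by omega
          omega
        · omega
    · rw [if_neg h]
      simp only []
      constructor
      · intro hp; refine ⟨hp, ?_⟩; omega
      · rintro ⟨h1, _⟩; exact h1

-- ===== VERDICT (by name: the statement is the Claim_ definition above) =====
theorem has_usable_ace_py_spec : Claim_equal_has_usable_ace_py := by
  intro cards _
  unfold Spec_has_usable_ace_py has_usable_ace_py has_usable_ace_py_alt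
  simp only []
  have h00 : (((0:Int), (0:Int)) : Int × Int) = ((0:Int) + 10 * 0, (0:Int)) := by norm_num
  conv_lhs => rw [h00, fold_rel cards 0 0]
  dsimp only
  set st := cards.foldl (fun (st : Int × Int) card =>
      if card == 1 then (st.1 + 1, st.2 + 1)
      else if card ≥ 10 then (st.1 + 10, st.2)
      else (st.1 + card, st.2)) ((0:Int), (0:Int)) with hst
  have hnn : 0 ≤ st.2 := fold_aces_nonneg cards 0 0 le_rfl
  rw [decide_eq_decide, demote_pos (st.1 + 10 * st.2) st.2 hnn]
  constructor
  · rintro ⟨h1, h2⟩; exact ⟨by omega, by omega⟩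
  · rintro ⟨h1, h2⟩; exact ⟨by omega, by omega⟩
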